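-- pv_equiv track=rewrite | github.com/jramaswami/Binary_Search_Python | team_voting.py | solve
-- ===== SOURCE A (Python) =====
-- from collections import defaultdict
--
-- def solve(votes):
--     vote_totals = defaultdict(lambda: [0 for _ in votes[0]])
--     for vote in votes:
--         for i, v in enumerate(vote):
--             vote_totals[v][i] -= 1
--
--     vote_totals0 = [(v, k) for k, v in vote_totals.items()]
--     vote_totals0.sort()
--     return "".join(t[1] for t in vote_totals0)
-- ===== SOURCE B (Python) =====
-- from collections import Counter
--
-- def solve(votes):
--     # Radix-style ranking: start from the alphabetical candidate order, then
--     # stably re-sort by each position's vote count, least significant position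
--     # first, so the final order is "most votes in earlier positions, ties by
--     # later positions, then alphabetically".
--     if not votes:
--         return ""
--     counts = [Counter() for _ in votes[0]]
--     for vote in votes:
--         for i, v in enumerate(vote):
--             counts[i][v] += 1
--     order = sorted({v for vote in votes for v in vote})
--     for cnt in reversed(counts):
--         order.sort(key=lambda c: cnt[c], reverse=True)
--     return "".join(order)
-- ===== Notes on version B (the rewrite author's own statement) =====
-- stated objective: alternative
-- what changed: Replaces A's 'build a defaultdict of negated per-position count vectors, then one lexicographic sort of (vector, char) pairs' by an LSD-radix scheme: per-position Counters, then starting from the alphabetical candidate order perform one stable descending re-sort per position from the last position to the first; Pre_ excludes only inputs where a vote is longer than votes[0], on which both A and B raise IndexError.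
import Mathlib
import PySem

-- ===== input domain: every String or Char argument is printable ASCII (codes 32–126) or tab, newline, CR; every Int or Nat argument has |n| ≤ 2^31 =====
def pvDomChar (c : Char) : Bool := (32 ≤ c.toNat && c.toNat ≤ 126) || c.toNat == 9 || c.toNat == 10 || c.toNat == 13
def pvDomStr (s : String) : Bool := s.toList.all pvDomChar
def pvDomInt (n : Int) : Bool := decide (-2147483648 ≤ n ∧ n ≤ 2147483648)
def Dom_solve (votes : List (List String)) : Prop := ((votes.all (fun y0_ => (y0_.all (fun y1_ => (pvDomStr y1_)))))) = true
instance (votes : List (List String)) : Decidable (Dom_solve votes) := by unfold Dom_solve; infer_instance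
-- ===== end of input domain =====

-- B replaces A's 'build a table of negated per-position count vectors, then one lexicographic sort
-- of (vector, char) pairs' by an LSD-radix scheme: per-position Counters, then repeated stable
-- descending re-sorts of the alphabetical candidate order, last position first (objective: alternative).

-- ===== PORT A =====
-- defaultdict access vote_totals[v] followed by the in-place 'list[i] -= 1' is Dict.modify with
-- the default [0]*len(votes[0]): a fresh key is appended, an existing key keeps its position.
def solve (votes : List (List String)) : String :=
  let voteTotals : PySem.Dict String (List Int) :=
    votes.foldl (fun d vote =>
      (PySem.List.enumerate vote).foldl (fun d p =>
        d.modify p.2 (List.replicate (votes.headD []).length (0 : Int))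
          (fun l => PySem.List.pySetD l p.1 (PySem.List.pyGetD l p.1 0 - 1))) d)
      PySem.Dict.empty
  let voteTotals0 := PySem.List.sorted2 (voteTotals.items.map (fun p => (p.2, p.1)))
      (fun t => t.1) (fun t => t.2)
  PySem.Str.join "" (voteTotals0.map (fun t => t.2))

-- ===== PORT B =====
-- counts[i][v] += 1 on a Counter is Dict.modify; the in-place counts[i] update is pySetD;
-- order.sort(key=..., reverse=True) is the stable PySem.List.sorted with reverse = true.
def solve_alt (votes : List (List String)) : String :=
  if votes = [] then "" else
  let counts : List (PySem.Dict String Int) :=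
    votes.foldl (fun cs vote =>
      (PySem.List.enumerate vote).foldl (fun cs p =>
        PySem.List.pySetD cs p.1
          ((PySem.List.pyGetD cs p.1 PySem.Dict.empty).modify p.2 0 (fun x => x + 1))) cs)
      ((votes.headD []).map (fun _ => PySem.Dict.empty))
  let order := counts.reverse.foldl
      (fun ord cnt => PySem.List.sorted ord (fun c => cnt.getD c 0) true)
      (PySem.List.sorted (PySem.Set.ofList (votes.flatMap (fun vote => vote))) (fun c => c))
  PySem.Str.join "" order

-- ===== PRECONDITION & SPEC =====
-- Both A and B raise IndexError as soon as some vote is longer than votes[0] (A's defaultdict rows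
-- have len(votes[0]) slots, B builds len(votes[0]) Counters); exactly those inputs are excluded.
def Pre_solve (votes : List (List String)) : Prop :=
  ∀ v ∈ votes, v.length ≤ (votes.headD []).length
instance (votes : List (List String)) : Decidable (Pre_solve votes) := by
  unfold Pre_solve; infer_instance
def pvWitness_solve : List (List String) := [["a", "b"], ["b", "a"]]

def Spec_solve (votes : List (List String)) (out : String) : Prop := out = solve_alt votes
instance (votes : List (List String)) (out : String) : Decidable (Spec_solve votes out) := by
  unfold Spec_solve; infer_instance

-- ===== CLAIM (what is proved, stated in full; the proofs are below) =====
def Claim_equal_solve : Prop :=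
  ∀ (votes : List (List String)), Dom_solve votes → Pre_solve votes → Spec_solve votes (solve votes)

-- ===== LEMMAS AND PROOFS =====

def pvCnt (votes : List (List String)) (i : Nat) (c : String) : Int :=
  (votes.countP (fun vote => PySem.List.pyGet? vote (i : Int) == some c) : Int)

def pvVec (votes : List (List String)) (c : String) : List Int :=
  (List.range (votes.headD []).length).map (fun i => -(pvCnt votes i c))

def pvQQ {α : Type} : List (α → Int) → (α → α → Prop) → (α → α → Prop)
  | [], R => R
  | f :: rest, R => pvQQ rest (fun a b => f b < f a ∨ (f a = f b ∧ R a b))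

theorem pv_insertBy_nil {α : Type} (b : α → α → Bool) (x : α) :
    PySem.List.insertBy b x [] = [x] := rfl

theorem pv_insertBy_cons {α : Type} (b : α → α → Bool) (x y : α) (ys : List α) :
    PySem.List.insertBy b x (y :: ys) =
      if b x y then x :: y :: ys else y :: PySem.List.insertBy b x ys := rfl

theorem pv_insertBy_pairwise {α : Type} (b : α → α → Bool) (Q : α → α → Prop)
    (htr : ∀ {x y z}, Q x y → Q y z → Q x z) (x : α) :
    ∀ ys : List α, ys.Pairwise Q →
      (∀ y ∈ ys, (b x y = true → Q x y) ∧ (b x y = false → Q y x)) →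
      (PySem.List.insertBy b x ys).Pairwise Q := by
  intro ys
  induction ys with
  | nil => intro _ _; simp [pv_insertBy_nil]
  | cons y ys ih =>
      intro hp hc
      rw [pv_insertBy_cons]
      rcases List.pairwise_cons.mp hp with ⟨hyys, hys⟩
      by_cases hb : b x y
      · simp only [hb, if_true]
        have hxy : Q x y := ((hc y (by simp)).1 hb)
        refine List.pairwise_cons.mpr ⟨?_, hp⟩
        intro z hz
        rcases hz with _ | hz
        · exact hxy
        · exact htr hxy (hyys z (by assumption))
      · simp only [hb]
        refine List.pairwise_cons.mpr ⟨?_, ih hys (fun y' hy' => hc y' (by simp [hy']))⟩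
        intro z hz
        rcases (PySem.List.insertBy_mem_iff b x z ys).mp hz with rfl | hz
        · exact (hc y (by simp)).2 (by simpa using hb)
        · exact hyys z hz

theorem pv_foldl_stable {α κ : Type} [LinearOrder κ] (key : α → κ) (R : α → α → Prop)
    (htr : ∀ x y z, R x y → R y z → R x z) :
    ∀ (xs acc : List α),
      acc.Pairwise (fun a b => key b < key a ∨ (key a = key b ∧ R a b)) →
      xs.Pairwise R → (∀ y ∈ acc, ∀ x ∈ xs, R y x) →
      (xs.foldl (fun a x => PySem.List.insertBy (fun a b => decide (key b < key a)) x a)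
        acc).Pairwise (fun a b => key b < key a ∨ (key a = key b ∧ R a b)) := by
  intro xs
  induction xs with
  | nil => intro acc hacc _ _; exact hacc
  | cons x xs ih =>
      intro acc hacc hxs hcross
      rcases List.pairwise_cons.mp hxs with ⟨hxxs, hxs'⟩
      simp only [List.foldl_cons]
      refine ih _ ?_ hxs' ?_
      · refine pv_insertBy_pairwise _ _ ?_ x acc hacc ?_
        · intro a b c hab hbc
          rcases hab with h | ⟨he, hr⟩ <;> rcases hbc with h2 | ⟨he2, hr2⟩
          · exact Or.inl (lt_trans h2 h)
          · exact Or.inl (he2 ▸ h)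
          · exact Or.inl (he ▸ h2)
          · exact Or.inr ⟨he.trans he2, htr _ _ _ hr hr2⟩
        · intro y hy
          constructor
          · intro hb; exact Or.inl (of_decide_eq_true hb)
          · intro hb
            have hle : key x ≤ key y := le_of_not_gt (of_decide_eq_false hb)
            rcases lt_or_eq_of_le hle with h | h
            · exact Or.inl h
            · exact Or.inr ⟨h.symm, hcross y hy x (by simp)⟩
      · intro y hy x' hx'
        rcases (PySem.List.insertBy_mem_iff _ x y acc).mp hy with rfl | hy
        · exact hxxs x' hx'
        · exact hcross y hy x' (by simp [hx'])

theorem pv_sorted_rev_stable {α κ : Type} [LinearOrder κ] (key : α → κ) (R : α → α → Prop)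
    (htr : ∀ x y z, R x y → R y z → R x z) (P : List α) (hP : P.Pairwise R) :
    (PySem.List.sorted P key true).Pairwise
      (fun a b => key b < key a ∨ (key a = key b ∧ R a b)) := by
  show (P.foldl (fun a x => PySem.List.insertBy (fun a b => decide (key b < key a)) x a)
      []).Pairwise _
  exact pv_foldl_stable key R htr P [] (by simp) hP (by simp)

theorem pv_radix {α : Type} :
    ∀ (ds : List (α → Int)) (R : α → α → Prop), (∀ x y z, R x y → R y z → R x z) →
      ∀ (P : List α), P.Pairwise R →
      (ds.foldl (fun ord f => PySem.List.sorted ord f true) P).Perm P ∧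
      (ds.foldl (fun ord f => PySem.List.sorted ord f true) P).Pairwise (pvQQ ds R) := by
  intro ds
  induction ds with
  | nil => intro R _ P hP; exact ⟨List.Perm.refl _, hP⟩
  | cons f rest ih =>
      intro R htr P hP
      simp only [List.foldl_cons]
      have h1 : (PySem.List.sorted P f true).Perm P := PySem.List.sorted_perm P f true
      have h2 := pv_sorted_rev_stable f R htr P hP
      have htr' : ∀ x y z : α, (f y < f x ∨ (f x = f y ∧ R x y)) →
          (f z < f y ∨ (f y = f z ∧ R y z)) → (f z < f x ∨ (f x = f z ∧ R x z)) := by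
        intro a b c hab hbc
        rcases hab with h | ⟨he, hr⟩ <;> rcases hbc with h2 | ⟨he2, hr2⟩
        · exact Or.inl (lt_trans h2 h)
        · exact Or.inl (he2 ▸ h)
        · exact Or.inl (he ▸ h2)
        · exact Or.inr ⟨he.trans he2, htr _ _ _ hr hr2⟩
      obtain ⟨hp, hq⟩ := ih _ htr' (PySem.List.sorted P f true) h2
      exact ⟨hp.trans h1, hq⟩

theorem pv_foldl_lex {α κ₁ κ₂ : Type} [LinearOrder κ₁] [LinearOrder κ₂]
    (k1 : α → κ₁) (k2 : α → κ₂) :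
    ∀ (xs acc : List α),
      acc.Pairwise (fun a b => k1 a < k1 b ∨ (k1 a = k1 b ∧ k2 a < k2 b)) →
      xs.Pairwise (fun a b => k2 a ≠ k2 b) → (∀ y ∈ acc, ∀ x ∈ xs, k2 y ≠ k2 x) →
      (xs.foldl (fun a x => PySem.List.insertBy
          (fun a b => decide (k1 a < k1 b) || (!decide (k1 b < k1 a) && decide (k2 a < k2 b)))
          x a) acc).Pairwise
        (fun a b => k1 a < k1 b ∨ (k1 a = k1 b ∧ k2 a < k2 b)) := by
  intro xs
  induction xs with
  | nil => intro acc hacc _ _; exact hacc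
  | cons x xs ih =>
      intro acc hacc hxs hcross
      rcases List.pairwise_cons.mp hxs with ⟨hxxs, hxs'⟩
      simp only [List.foldl_cons]
      refine ih _ ?_ hxs' ?_
      · refine pv_insertBy_pairwise _ _ ?_ x acc hacc ?_
        · intro a b c hab hbc
          rcases hab with h | ⟨he, hr⟩ <;> rcases hbc with h2 | ⟨he2, hr2⟩
          · exact Or.inl (lt_trans h h2)
          · exact Or.inl (he2 ▸ h)
          · exact Or.inl (he ▸ h2)
          · exact Or.inr ⟨he.trans he2, lt_trans hr hr2⟩
        · intro y hy
          constructor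
          · intro hb
            simp only [Bool.or_eq_true, Bool.and_eq_true, Bool.not_eq_true',
              decide_eq_true_eq, decide_eq_false_iff_not] at hb
            rcases hb with h | ⟨h1, h2⟩
            · exact Or.inl h
            · rcases lt_trichotomy (k1 x) (k1 y) with h | h | h
              · exact Or.inl h
              · exact Or.inr ⟨h, h2⟩
              · exact absurd h h1
          · intro hb
            simp only [Bool.or_eq_false_iff, Bool.and_eq_false_iff, Bool.not_eq_false',
              decide_eq_true_eq, decide_eq_false_iff_not] at hb
            rcases hb with ⟨h1, h2 | h2⟩
            · exact Or.inl h2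
            · rcases lt_trichotomy (k1 y) (k1 x) with h | h | h
              · exact Or.inl h
              · exact Or.inr ⟨h, lt_of_le_of_ne (le_of_not_gt h2)
                  (hcross y hy x (by simp))⟩
              · exact absurd h h1
      · intro y hy x' hx'
        rcases (PySem.List.insertBy_mem_iff _ x y acc).mp hy with rfl | hy
        · exact hxxs x' hx'
        · exact hcross y hy x' (by simp [hx'])

theorem pv_sorted2_unique {α κ₁ κ₂ : Type} [LinearOrder κ₁] [LinearOrder κ₂]
    (xs ys : List α) (k1 : α → κ₁) (k2 : α → κ₂)
    (hperm : ys.Perm xs)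
    (hys : ys.Pairwise (fun a b => k1 a < k1 b ∨ (k1 a = k1 b ∧ k2 a < k2 b)))
    (hxs : xs.Pairwise (fun a b => k2 a ≠ k2 b)) :
    PySem.List.sorted2 xs k1 k2 = ys := by
  have h1 : (PySem.List.sorted2 xs k1 k2).Perm xs := PySem.List.sorted2_perm xs k1 k2 false
  have h2 : (PySem.List.sorted2 xs k1 k2).Pairwise
      (fun a b => k1 a < k1 b ∨ (k1 a = k1 b ∧ k2 a < k2 b)) := by
    show (xs.foldl (fun a x => PySem.List.insertBy
        (fun a b => decide (k1 a < k1 b) || (!decide (k1 b < k1 a) && decide (k2 a < k2 b)))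
        x a) []).Pairwise _
    exact pv_foldl_lex k1 k2 xs [] (by simp) hxs (by simp)
  refine List.Perm.eq_of_pairwise ?_ h2 hys (h1.trans hperm.symm)
  intro a b _ _ hab hba
  exfalso
  rcases hab with h | ⟨he, hr⟩ <;> rcases hba with h2 | ⟨he2, hr2⟩
  · exact absurd h2 (lt_asymm h)
  · exact absurd h (he2 ▸ lt_irrefl _)
  · exact absurd h2 (he ▸ lt_irrefl _)
  · exact absurd hr2 (lt_asymm hr)

theorem pv_append_lt_iff : ∀ (u v : List Int) (x y : Int), u.length = v.length →
    ((u ++ [x]) < (v ++ [y]) ↔ u < v ∨ (u = v ∧ x < y)) := by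
  intro u
  induction u with
  | nil =>
      intro v x y hlen
      cases v with
      | nil => simp [List.cons_lt_cons_iff]
      | cons b v => simp at hlen
  | cons a u ih =>
      intro v x y hlen
      cases v with
      | nil => simp at hlen
      | cons b v =>
          simp only [List.length_cons, Nat.add_right_cancel_iff] at hlen
          simp only [List.cons_append, List.cons_lt_cons_iff, ih v x y hlen, List.cons.injEq]
          tauto

theorem pv_QQ_range {α : Type} (g : Nat → α → Int) : ∀ (m : Nat) (R : α → α → Prop),
    pvQQ (((List.range m).map (fun j => g j)).reverse) R =
      fun a b => ((List.range m).map (fun i => -(g i a))) < ((List.range m).map (fun i => -(g i b)))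
        ∨ (((List.range m).map (fun i => -(g i a))) = ((List.range m).map (fun i => -(g i b))) ∧ R a b) := by
  intro m
  induction m with
  | zero =>
      intro R
      funext a b
      simp [pvQQ]
  | succ m ih =>
      intro R
      rw [List.range_succ, List.map_append, List.reverse_append]
      simp only [List.map_cons, List.map_nil, List.reverse_cons, List.reverse_nil,
        List.nil_append, List.cons_append]
      show pvQQ (g m :: ((List.range m).map (fun j => g j)).reverse) R = _
      rw [show pvQQ (g m :: ((List.range m).map (fun j => g j)).reverse) R =
          pvQQ (((List.range m).map (fun j => g j)).reverse)
            (fun a b => g m b < g m a ∨ (g m a = g m b ∧ R a b)) from rfl]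
      rw [ih]
      funext a b
      have hlen : ((List.range m).map (fun i => -(g i a))).length
          = ((List.range m).map (fun i => -(g i b))).length := by simp
      simp only [List.map_append, List.map_cons, List.map_nil]
      apply propext
      have heq_iff : ((List.range m).map (fun i => -(g i a))) ++ [-(g m a)]
          = ((List.range m).map (fun i => -(g i b))) ++ [-(g m b)] ↔
          (((List.range m).map (fun i => -(g i a))) = ((List.range m).map (fun i => -(g i b)))
            ∧ -(g m a) = -(g m b)) := by
        constructor
        · intro h
          exact ⟨(List.append_inj h (by simp)).1, by simpa using (List.append_inj h (by simp)).2⟩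
        · rintro ⟨h1, h2⟩; rw [h1, h2]
      rw [pv_append_lt_iff _ _ _ _ hlen, heq_iff, neg_lt_neg_iff, neg_inj]
      tauto

theorem pv_foldl_foldl {α β γ : Type} (g : β → List γ) (f : α → γ → α) :
    ∀ (l : List β) (init : α),
      l.foldl (fun a b => (g b).foldl f a) init = (l.flatMap g).foldl f init := by
  intro l
  induction l with
  | nil => intro init; rfl
  | cons b l ih => intro init; simp [List.flatMap_cons, List.foldl_append, ih]

theorem pv_getD_foldl_modify_group {κ ν β : Type} [BEq κ] [LawfulBEq κ]
    (key : β → κ) (d0 : ν) (f : β → ν → ν) :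
    ∀ (L : List β) (d : PySem.Dict κ ν) (c : κ),
      ((L.foldl (fun d p => d.modify (key p) d0 (f p)) d).getD c d0) =
        (L.filter (fun p => key p == c)).foldl (fun v p => f p v) (d.getD c d0) := by
  intro L
  induction L with
  | nil => intro d c; rfl
  | cons p L ih =>
      intro d c
      by_cases h : key p = c
      · subst h
        simp only [List.foldl_cons, ih, List.filter_cons, BEq.rfl, if_true,
          PySem.Dict.getD_modify_self]
      · have h' : c ≠ key p := fun hc => h hc.symm
        simp only [List.foldl_cons, ih, List.filter_cons,
          PySem.Dict.getD_modify_of_ne _ _ _ h']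
        simp [h]

theorem pv_decr_fold (n : Nat) :
    ∀ (js : List Int) (l : List Int), l.length = n → (∀ j ∈ js, 0 ≤ j ∧ j < (n : Int)) →
      js.foldl (fun l j => PySem.List.pySetD l j (PySem.List.pyGetD l j 0 - 1)) l =
        (List.range n).map (fun (i : Nat) => PySem.List.pyGetD l (i : Int) 0 - (js.count ((i : Int)) : Int)) := by
  intro js
  induction js with
  | nil =>
      intro l hlen _
      simp only [List.foldl_nil, List.count_nil]
      refine (List.ext_getElem (by simp [hlen]) ?_).symm
      intro i hi hi2
      simp only [List.getElem_map, List.getElem_range]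
      have hi' : i < l.length := by simpa [hlen] using hi2
      rw [PySem.List.pyGetD_natCast, List.getD_eq_getElem l 0 hi']
      simp
  | cons j js ih =>
      intro l hlen hb
      obtain ⟨hj0, hjn⟩ := hb j (by simp)
      obtain ⟨jn, rfl⟩ : ∃ jn : Nat, j = (jn : Int) := ⟨j.toNat, by omega⟩
      have hjl : jn < l.length := by rw [hlen]; exact_mod_cast hjn
      simp only [List.foldl_cons]
      rw [ih _ (by rw [PySem.List.length_pySetD]; exact hlen)
        (fun j' hj' => hb j' (by simp [hj']))]
      refine List.ext_getElem (by simp) ?_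
      intro i hi hi2
      simp only [List.getElem_map, List.getElem_range]
      rw [PySem.List.pyGetD_pySetD_natCast l jn i _ 0 hjl]
      by_cases hij : i = jn
      · subst hij
        rw [if_pos rfl, List.count_cons, if_pos (by simp)]
        push_cast
        ring
      · rw [if_neg hij, List.count_cons,
          if_neg (by simp only [beq_iff_eq, Int.natCast_inj]; exact fun h => hij h.symm)]
        simp

theorem pv_enum_countP_lt (c : String) :
    ∀ (vote : List String) (s j : Int), j < s →
      (PySem.List.enumerate vote s).countP (fun p => p.1 == j && p.2 == c) = 0 := by
  intro vote
  induction vote with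
  | nil => intro s j _; simp [PySem.List.enumerate_nil]
  | cons x xs ih =>
      intro s j hj
      rw [PySem.List.enumerate_cons, List.countP_cons]
      rw [ih (s+1) j (by omega)]
      have : ¬(s = j) := by omega
      simp [this]

theorem pv_enum_countP_ge (c : String) :
    ∀ (vote : List String) (s j : Int), s ≤ j →
      (PySem.List.enumerate vote s).countP (fun p => p.1 == j && p.2 == c) =
        if PySem.List.pyGet? vote (j - s) = some c then 1 else 0 := by
  intro vote
  induction vote with
  | nil =>
      intro s j _
      simp [PySem.List.enumerate_nil, PySem.List.pyGet?]
  | cons x xs ih =>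
      intro s j hs
      rw [PySem.List.enumerate_cons, List.countP_cons]
      by_cases hj : j = s
      · subst hj
        rw [pv_enum_countP_lt c xs (j+1) j (by omega)]
        have hget : PySem.List.pyGet? (x :: xs) (j - j) = some x := by
          simp [PySem.List.pyGet?, PySem.List.pyIdx?]
        rw [hget]
        by_cases hxc : x = c <;> simp [hxc]
      · have hs1 : s + 1 ≤ j := by omega
        rw [ih (s+1) j hs1]
        have hget : PySem.List.pyGet? (x :: xs) (j - s) = PySem.List.pyGet? xs (j - (s+1)) := by
          obtain ⟨t, ht⟩ : ∃ t : Nat, j - s = ((t+1 : Nat) : Int) := by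
            refine ⟨(j - s - 1).toNat, by omega⟩
          rw [ht, PySem.List.pyGet?_natCast]
          have h2 : j - (s+1) = ((t : Nat) : Int) := by omega
          rw [h2, PySem.List.pyGet?_natCast]
          simp
        rw [hget]
        have : ¬(s = j) := by omega
        simp [this]

theorem pv_countP_flat (votes : List (List String)) (i : Nat) (c : String) :
    ((votes.flatMap (fun vote => PySem.List.enumerate vote 0)).countP
        (fun p => p.1 == ((i : Nat) : Int) && p.2 == c) : Int) =
      (votes.countP (fun vote => PySem.List.pyGet? vote (i : Int) == some c) : Int) := by
  induction votes with
  | nil => simp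
  | cons vote votes ih =>
      rw [List.flatMap_cons, List.countP_append, List.countP_cons]
      push_cast
      rw [← ih]
      rw [pv_enum_countP_ge c vote 0 (i : Int) (by omega)]
      push_cast
      have : (i : Int) - 0 = (i : Int) := by ring
      rw [this]
      by_cases h : PySem.List.pyGet? vote (i : Int) = some c <;> simp [h] <;> ring

theorem pv_E_bounds (votes : List (List String))
    (hpre : ∀ v ∈ votes, v.length ≤ (votes.headD []).length) :
    ∀ p ∈ votes.flatMap (fun vote => PySem.List.enumerate vote 0),
      0 ≤ p.1 ∧ p.1 < ((votes.headD []).length : Int) := by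
  intro p hp
  rcases List.mem_flatMap.mp hp with ⟨vote, hv, hpv⟩
  rcases (PySem.List.mem_enumerate_iff vote 0 p).mp hpv with ⟨k, hk, rfl⟩
  have h1 : (k : Int) < (vote.length : Int) := by exact_mod_cast hk
  have h2 : (vote.length : Int) ≤ ((votes.headD []).length : Int) := by
    exact_mod_cast hpre vote hv
  constructor
  · simp
  · simp only []
    omega

theorem pv_items_eq {ν : Type} (dflt : ν) :
    ∀ (l : List (String × ν)), (l.map Prod.fst).Nodup →
      l = (l.map Prod.fst).map (fun k => (k, (PySem.Dict.mk l).getD k dflt)) := by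
  intro l
  induction l with
  | nil => intro _; rfl
  | cons kv l ih =>
      intro hnd
      rcases List.pairwise_cons.mp hnd with ⟨hk, hnd'⟩
      obtain ⟨k, v⟩ := kv
      simp only [List.map_cons]
      have h1 : (PySem.Dict.mk ((k, v) :: l)).getD k dflt = v := by
        simp [PySem.Dict.getD, PySem.Dict.get?_mk_cons]
      rw [h1]
      congr 1
      have h2 : ∀ k' ∈ l.map Prod.fst,
          (PySem.Dict.mk ((k, v) :: l)).getD k' dflt = (PySem.Dict.mk l).getD k' dflt := by
        intro k' hk'
        have hne : ¬(k == k') := by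
          simp only [beq_iff_eq]
          intro h; exact hk k' hk' h
        simp [PySem.Dict.getD, PySem.Dict.get?_mk_cons, hne]
      rw [List.map_congr_left (fun k' hk' => by rw [h2 k' hk'])]
      exact ih hnd'

theorem pv_keys_A (d0 : List Int) :
    ∀ (vs : List (List String)) (d : PySem.Dict String (List Int)),
      (vs.foldl (fun d vote =>
        (PySem.List.enumerate vote).foldl (fun d p =>
          d.modify p.2 d0
            (fun l => PySem.List.pySetD l p.1 (PySem.List.pyGetD l p.1 0 - 1))) d) d).keys =
      PySem.Set.update d.keys (vs.flatMap (fun v => v)) := by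
  intro vs
  induction vs with
  | nil => intro d; rfl
  | cons vote vs ih =>
      intro d
      simp only [List.foldl_cons]
      rw [ih]
      have h1 : ((PySem.List.enumerate vote).foldl (fun d p =>
          d.modify p.2 d0
            (fun l => PySem.List.pySetD l p.1 (PySem.List.pyGetD l p.1 0 - 1))) d).keys =
          PySem.Set.update d.keys ((PySem.List.enumerate vote).map (fun p => p.2)) :=
        PySem.Dict.keys_foldl_modify_key (PySem.List.enumerate vote) (fun p => p.2) d0
          (fun _ p => fun l => PySem.List.pySetD l p.1 (PySem.List.pyGetD l p.1 0 - 1)) d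
      rw [h1, PySem.List.map_snd_enumerate]
      show PySem.Set.update (PySem.Set.update d.keys vote) (vs.flatMap (fun v => v)) =
        PySem.Set.update d.keys (vote ++ vs.flatMap (fun v => v))
      show (vs.flatMap (fun v => v)).foldl PySem.Set.add (vote.foldl PySem.Set.add d.keys) =
        (vote ++ vs.flatMap (fun v => v)).foldl PySem.Set.add d.keys
      rw [List.foldl_append]

theorem pv_getD_A (votes : List (List String))
    (hpre : ∀ v ∈ votes, v.length ≤ (votes.headD []).length) (c : String) :
    (votes.foldl (fun d vote =>
        (PySem.List.enumerate vote).foldl (fun d p =>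
          d.modify p.2 (List.replicate (votes.headD []).length (0 : Int))
            (fun l => PySem.List.pySetD l p.1 (PySem.List.pyGetD l p.1 0 - 1))) d)
        PySem.Dict.empty).getD c (List.replicate (votes.headD []).length (0 : Int)) =
      pvVec votes c := by
  set n := (votes.headD []).length with hn
  set E := votes.flatMap (fun vote => PySem.List.enumerate vote 0) with hE
  rw [pv_foldl_foldl (fun vote => PySem.List.enumerate vote 0)
    (fun d (p : Int × String) => d.modify p.2 (List.replicate n (0 : Int))
      (fun l => PySem.List.pySetD l p.1 (PySem.List.pyGetD l p.1 0 - 1))) votes PySem.Dict.empty]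
  rw [pv_getD_foldl_modify_group (fun p : Int × String => p.2) (List.replicate n (0:Int))
    (fun p l => PySem.List.pySetD l p.1 (PySem.List.pyGetD l p.1 0 - 1)) E PySem.Dict.empty c]
  have hgd : (PySem.Dict.empty : PySem.Dict String (List Int)).getD c (List.replicate n 0)
      = List.replicate n 0 := rfl
  rw [hgd]
  have hfm : (E.filter (fun p => p.2 == c)).foldl
        (fun v p => PySem.List.pySetD v p.1 (PySem.List.pyGetD v p.1 0 - 1))
        (List.replicate n (0 : Int))
      = ((E.filter (fun p => p.2 == c)).map (fun p => p.1)).foldl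
        (fun l j => PySem.List.pySetD l j (PySem.List.pyGetD l j 0 - 1))
        (List.replicate n (0 : Int)) := by
    rw [List.foldl_map]
  refine hfm.trans ?_
  set js := (E.filter (fun p => p.2 == c)).map (fun p => p.1) with hjs
  have hb : ∀ j ∈ js, 0 ≤ j ∧ j < (n : Int) := by
    intro j hj
    rcases List.mem_map.mp hj with ⟨p, hp, rfl⟩
    exact pv_E_bounds votes hpre p (List.mem_of_mem_filter hp)
  rw [pv_decr_fold n js (List.replicate n (0 : Int)) (by simp) hb]
  unfold pvVec
  rw [← hn]
  apply List.map_congr_left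
  intro i hi
  have hin : i < n := List.mem_range.mp hi
  have hget : PySem.List.pyGetD (List.replicate n (0:Int)) (i : Int) 0 = 0 := by
    rw [PySem.List.pyGetD_natCast]
    simp
  rw [hget]
  have hcount : (js.count ((i : Int)) : Int) = pvCnt votes i c := by
    rw [hjs, List.count_eq_countP, List.countP_map, List.countP_filter]
    rw [show ((fun x => x == (i : Int)) ∘ (fun p : Int × String => p.1)) = (fun p : Int × String => p.1 == (i : Int)) from rfl]
    exact pv_countP_flat votes i c
  rw [hcount]
  ring

theorem pv_cnts_fold :
    ∀ (E : List (Int × String)) (cs : List (PySem.Dict String Int)),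
      (∀ p ∈ E, 0 ≤ p.1 ∧ p.1 < (cs.length : Int)) →
      (E.foldl (fun cs p => PySem.List.pySetD cs p.1
          ((PySem.List.pyGetD cs p.1 PySem.Dict.empty).modify p.2 0 (fun x => x + 1))) cs).length
        = cs.length ∧
      ∀ (i : Nat), i < cs.length → ∀ (c : String),
        (PySem.List.pyGetD
            (E.foldl (fun cs p => PySem.List.pySetD cs p.1
              ((PySem.List.pyGetD cs p.1 PySem.Dict.empty).modify p.2 0 (fun x => x + 1))) cs)
            ((i : Nat) : Int) PySem.Dict.empty).getD c 0 =
          (PySem.List.pyGetD cs ((i : Nat) : Int) PySem.Dict.empty).getD c 0 +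
            (E.countP (fun p => p.1 == ((i : Nat) : Int) && p.2 == c) : Int) := by
  intro E
  induction E with
  | nil => intro cs _; exact ⟨rfl, by intro i _ c; simp⟩
  | cons p E ih =>
      intro cs hb
      obtain ⟨hp0, hpn⟩ := hb p (by simp)
      obtain ⟨pn, hpn'⟩ : ∃ pn : Nat, p.1 = (pn : Int) := ⟨p.1.toNat, by omega⟩
      have hpl : pn < cs.length := by
        have := hpn; rw [hpn'] at this; exact_mod_cast this
      have hlen1 : (PySem.List.pySetD cs p.1
          ((PySem.List.pyGetD cs p.1 PySem.Dict.empty).modify p.2 0 (fun x => x + 1))).length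
          = cs.length := PySem.List.length_pySetD cs p.1 _
      obtain ⟨ihl, ihv⟩ := ih (PySem.List.pySetD cs p.1
          ((PySem.List.pyGetD cs p.1 PySem.Dict.empty).modify p.2 0 (fun x => x + 1)))
        (by intro q hq; rw [hlen1]; exact hb q (by simp [hq]))
      constructor
      · simp only [List.foldl_cons]
        rw [ihl, hlen1]
      · intro i hi c
        simp only [List.foldl_cons]
        rw [ihv i (by rw [hlen1]; exact hi) c]
        rw [hpn']
        rw [PySem.List.pyGetD_pySetD_natCast cs pn i _ PySem.Dict.empty hpl]
        rw [List.countP_cons]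
        by_cases hip : i = pn
        · subst hip
          rw [if_pos rfl]
          have hgd : ((PySem.List.pyGetD cs ((i : Nat) : Int) PySem.Dict.empty).modify p.2 0
              (fun x => x + 1)).getD c 0 =
              if p.2 = c then (PySem.List.pyGetD cs ((i : Nat) : Int) PySem.Dict.empty).getD c 0 + 1
              else (PySem.List.pyGetD cs ((i : Nat) : Int) PySem.Dict.empty).getD c 0 := by
            by_cases hc : p.2 = c
            · subst hc; rw [if_pos rfl, PySem.Dict.getD_modify_self]
            · rw [if_neg hc, PySem.Dict.getD_modify_of_ne _ _ _ (fun h => hc h.symm)]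
          rw [hgd]
          have hhead : (p.1 == ((i : Nat) : Int) && p.2 == c) = (p.2 == c) := by
            rw [hpn']; simp
          rw [hhead]
          by_cases hc : p.2 = c
          · rw [if_pos hc]; simp [hc]; ring
          · rw [if_neg hc]; simp [hc]
        · rw [if_neg hip]
          have hhead : (p.1 == ((i : Nat) : Int) && p.2 == c) = false := by
            rw [hpn']; simp only [Bool.and_eq_false_iff]
            exact Or.inl (by simpa using fun h => hip h.symm)
          rw [hhead]
          simp

theorem pv_main (votes : List (List String)) (hpre : Pre_solve votes)
    (hv : votes ≠ []) : solve votes = solve_alt votes := by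
  simp only [solve, solve_alt, if_neg hv]
  set n := (votes.headD []).length with hn
  set flat := votes.flatMap (fun vote => vote) with hflat
  set S0 := PySem.Set.ofList flat with hS0
  set d0 := List.replicate n (0 : Int) with hd0
  set g : Nat → String → Int := fun j c => pvCnt votes j c with hg
  set f : String → List Int × String := fun c => (pvVec votes c, c) with hf
  -- A's dict
  set dA := votes.foldl (fun d vote =>
      (PySem.List.enumerate vote).foldl (fun d p =>
        d.modify p.2 d0
          (fun l => PySem.List.pySetD l p.1 (PySem.List.pyGetD l p.1 0 - 1))) d)
      PySem.Dict.empty with hdA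
  have hkeys : dA.keys = S0 := by
    rw [hdA, pv_keys_A d0 votes PySem.Dict.empty]
    show PySem.Set.update ([] : PySem.Set String) flat = S0
    rw [hS0, PySem.Set.ofList_eq_foldl]
    rfl
  have hnodup : dA.keys.Nodup := by rw [hkeys]; exact PySem.Set.nodup_ofList flat
  have hgetD : ∀ c, dA.getD c d0 = pvVec votes c := by
    intro c; rw [hdA, hd0, hn]; exact pv_getD_A votes hpre c
  have hitems : dA.items = S0.map (fun c => (c, pvVec votes c)) := by
    have h1 := pv_items_eq d0 dA.items (by exact hnodup)
    have h2 : (PySem.Dict.mk dA.items) = dA := rfl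
    rw [h2] at h1
    have h3 : (dA.items.map Prod.fst) = S0 := hkeys
    rw [h3] at h1
    refine h1.trans ?_
    exact List.map_congr_left (fun c _ => by rw [hgetD c])
  have hpairs : dA.items.map (fun p => (p.2, p.1)) = S0.map f := by
    rw [hitems, List.map_map]; rfl
  -- B's counters
  set E := votes.flatMap (fun vote => PySem.List.enumerate vote 0) with hE
  set init : List (PySem.Dict String Int) := (votes.headD []).map (fun _ => PySem.Dict.empty)
    with hinit
  have hinitlen : init.length = n := by rw [hinit, List.length_map, hn]
  have hEb : ∀ p ∈ E, 0 ≤ p.1 ∧ p.1 < (init.length : Int) := by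
    rw [hinitlen, hE, hn]; exact pv_E_bounds votes hpre
  obtain ⟨hclen, hcval⟩ := pv_cnts_fold E init hEb
  set counts := votes.foldl (fun cs vote =>
      (PySem.List.enumerate vote).foldl (fun cs p =>
        PySem.List.pySetD cs p.1
          ((PySem.List.pyGetD cs p.1 PySem.Dict.empty).modify p.2 0 (fun x => x + 1))) cs)
      init with hcounts
  have hcountsE : counts = E.foldl (fun cs p => PySem.List.pySetD cs p.1
      ((PySem.List.pyGetD cs p.1 PySem.Dict.empty).modify p.2 0 (fun x => x + 1))) init := by
    rw [hcounts, hE]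
    exact pv_foldl_foldl (fun vote => PySem.List.enumerate vote 0) _ votes init
  have hcountslen : counts.length = n := by rw [hcountsE, hclen, hinitlen]
  have hinitget : ∀ (i : Nat), i < n →
      PySem.List.pyGetD init ((i : Nat) : Int) PySem.Dict.empty = PySem.Dict.empty := by
    intro i hi
    rw [PySem.List.pyGetD_natCast, hinit]
    rw [List.getD_eq_getElem _ _ (by rw [List.length_map, ← hn]; exact hi)]
    simp
  have hcget : ∀ (i : Nat), i < n → ∀ c,
      (PySem.List.pyGetD counts ((i : Nat) : Int) PySem.Dict.empty).getD c 0 = pvCnt votes i c := by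
    intro i hi c
    rw [hcountsE, hcval i (by rw [hinitlen]; exact hi) c, hinitget i hi]
    have h0 : (PySem.Dict.empty : PySem.Dict String Int).getD c 0 = 0 := rfl
    rw [h0, hE, pv_countP_flat votes i c]
    simp [pvCnt]
  set keyOf : PySem.Dict String Int → String → Int := fun d c => d.getD c 0 with hkeyOf
  have hmap : counts.map keyOf = (List.range n).map (fun j => g j) := by
    refine List.ext_getElem (by simp [hcountslen]) ?_
    intro i hi hi2
    have hin : i < n := by simpa [hcountslen] using hi
    simp only [List.getElem_map, List.getElem_range]
    funext c
    show counts[i].getD c 0 = g i c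
    have hig : PySem.List.pyGetD counts ((i : Nat) : Int) PySem.Dict.empty = counts[i] := by
      rw [PySem.List.pyGetD_natCast, List.getD_eq_getElem _ _ (by rw [hcountslen]; exact hin)]
    rw [← hig, hcget i hin c, hg]
  -- B's order
  set P0 := PySem.List.sorted S0 (fun c => c) with hP0
  have hP0perm : P0.Perm S0 := PySem.List.sorted_perm S0 (fun c => c) false
  have hP0pair : P0.Pairwise (fun a b => a < b) := PySem.List.sorted_ofList_pairwise_lt flat
  set order := counts.reverse.foldl
      (fun ord cnt => PySem.List.sorted ord (fun c => cnt.getD c 0) true) P0 with horder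
  have horderE : order = (counts.reverse.map keyOf).foldl
      (fun ord k => PySem.List.sorted ord k true) P0 := by
    rw [horder, List.foldl_map]
  have hds : counts.reverse.map keyOf = ((List.range n).map (fun j => g j)).reverse := by
    rw [List.map_reverse, hmap]
  have htr0 : ∀ x y z : String, x < y → y < z → x < z := fun _ _ _ => lt_trans
  obtain ⟨hBperm, hBpair⟩ :=
    pv_radix (counts.reverse.map keyOf) (fun a b => a < b) htr0 P0 hP0pair
  rw [← horderE] at hBperm hBpair
  have hBpermS0 : order.Perm S0 := hBperm.trans hP0perm
  have hBpairS : order.Pairwise (fun a b =>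
      pvVec votes a < pvVec votes b ∨ (pvVec votes a = pvVec votes b ∧ a < b)) := by
    have h := hBpair
    rw [hds, pv_QQ_range g n (fun a b => a < b)] at h
    exact h
  -- A's sort equals B's order
  have hsort : PySem.List.sorted2 (dA.items.map (fun p => (p.2, p.1)))
      (fun t => t.1) (fun t => t.2) = order.map f := by
    have e1 : (fun (a b : List Int) => a.decidableLT b) =
        (LinearOrder.toDecidableLT : DecidableLT (List Int)) := by
      funext a b; exact Subsingleton.elim _ _
    rw [e1]
    refine pv_sorted2_unique (dA.items.map (fun p => (p.2, p.1))) (order.map f)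
        (fun t => t.1) (fun t => t.2) ?_ ?_ ?_
    · rw [hpairs]; exact hBpermS0.map f
    · rw [List.pairwise_map]
      exact hBpairS
    · rw [hpairs, List.pairwise_map]
      refine (PySem.Set.nodup_ofList flat).imp ?_
      intro a b hab
      exact hab
  rw [hsort, List.map_map]
  have hcomp : ((fun t : List Int × String => t.2) ∘ f) = id := rfl
  rw [hcomp, List.map_id]

-- ===== VERDICT (by name: the statement is the Claim_ definition above) =====
theorem solve_spec : Claim_equal_solve := by
  intro votes _ hpre
  unfold Spec_solve
  by_cases hv : votes = []
  · subst hv; rfl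
  · exact pv_main votes hpre hv
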